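-- pv_equiv track=rewrite | github.com/Jazende/AdventOfCode | aoc23/14.py | roll_west
-- ===== SOURCE A (Python) =====
-- def roll_west(blocks, boulders, rows, cols):
--     # x[0] / col zo klein mogelijk
--     boulders.sort(key=lambda x: x[0])
--     new_boulders = []
--     for boulder in boulders:
--         col, row = boulder
--         while True:
--             if (col-1, row) in blocks or (col-1, row) in new_boulders or col == 0:
--                 new_boulders.append( (col, row) )
--                 break
--             col -= 1
--     return new_boulders
-- ===== SOURCE B (Python) =====
-- def roll_west(blocks, boulders, rows, cols):
--     # Like A, sorts `boulders` in place (same observable mutation).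
--     boulders.sort(key=lambda x: x[0])
--     last = {}
--     out = []
--     for col, row in boulders:
--         bw = -1
--         for c, r in blocks:
--             if r == row and c < col and c > bw:
--                 bw = c
--         dest = max(bw, last.get(row, -1)) + 1
--         if dest > col:
--             dest = col
--         last[row] = dest
--         out.append((dest, row))
--     return out
-- ===== Notes on version B (the rewrite author's own statement) =====
-- stated objective: faster
-- what changed: B replaces A's cell-by-cell sliding simulation with a linear membership scan of the growing output list by a direct placement formula: one scan of blocks for the nearest west block plus a per-row dict of the last placed column, so each boulder is placed in O(|blocks|) with no simulation.
-- outside the precondition, e.g. on roll_west({(-7, 0)}, [(-5, 0)], 0, 0): A returns [(-6, 0)], B returns [(-5, 0)]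
import Mathlib
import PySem

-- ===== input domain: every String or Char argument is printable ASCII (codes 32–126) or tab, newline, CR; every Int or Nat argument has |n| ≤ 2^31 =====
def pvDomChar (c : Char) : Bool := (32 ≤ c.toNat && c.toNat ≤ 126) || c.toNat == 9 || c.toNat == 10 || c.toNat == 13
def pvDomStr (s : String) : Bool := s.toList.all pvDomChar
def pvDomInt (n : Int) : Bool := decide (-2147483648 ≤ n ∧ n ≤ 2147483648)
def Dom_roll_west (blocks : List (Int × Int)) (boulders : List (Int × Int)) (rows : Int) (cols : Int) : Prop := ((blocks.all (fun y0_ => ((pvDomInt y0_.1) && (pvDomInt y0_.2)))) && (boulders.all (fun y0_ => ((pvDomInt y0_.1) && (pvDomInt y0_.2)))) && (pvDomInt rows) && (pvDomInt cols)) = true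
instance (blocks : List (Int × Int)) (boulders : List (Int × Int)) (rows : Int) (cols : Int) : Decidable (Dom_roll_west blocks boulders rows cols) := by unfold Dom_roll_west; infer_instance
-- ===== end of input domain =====

-- B replaces A's cell-by-cell slide (with a membership scan of the growing output each step)
-- by a direct placement formula: nearest west block by one scan of blocks + a per-row dict of
-- the last placed column (objective: faster). Both programs sort `boulders` in place; the
-- equivalence proved here is about the return value (B performs the same mutation).

-- ===== PORT A =====
-- A's `while True` slide loop; fuel b.1.toNat+1 suffices whenever the boulder column is ≥ 0 (Pre_)
def rwSlide (blocks nb : List (Int × Int)) (row : Int) : Nat → Int → Int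
  | 0, col => col
  | f+1, col =>
    if blocks.contains (col - 1, row) || nb.contains (col - 1, row) || col == 0 then col
    else rwSlide blocks nb row f (col - 1)

def rwStepA (blocks : List (Int × Int)) (nb : List (Int × Int)) (b : Int × Int) : List (Int × Int) :=
  nb ++ [(rwSlide blocks nb b.2 (b.1.toNat + 1) b.1, b.2)]

def roll_west (blocks : List (Int × Int)) (boulders : List (Int × Int)) (rows : Int) (cols : Int) : List (Int × Int) :=
  (PySem.List.sorted boulders (fun x => x.1) false).foldl (rwStepA blocks) []

-- ===== PORT B =====
-- scan of blocks for the greatest block column in `row` that is < col (default -1)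
def bwScan (blocks : List (Int × Int)) (row col : Int) : Int :=
  blocks.foldl (fun bw p => if p.2 = row ∧ p.1 < col ∧ bw < p.1 then p.1 else bw) (-1)

def rwStepB (blocks : List (Int × Int)) (st : List (Int × Int) × PySem.Dict Int Int) (b : Int × Int) :
    List (Int × Int) × PySem.Dict Int Int :=
  let bw := bwScan blocks b.2 b.1
  let dest0 := max bw (st.2.getD b.2 (-1)) + 1
  let dest := if dest0 > b.1 then b.1 else dest0
  (st.1 ++ [(dest, b.2)], st.2.insert b.2 dest)

def roll_west_alt (blocks : List (Int × Int)) (boulders : List (Int × Int)) (rows : Int) (cols : Int) : List (Int × Int) :=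
  ((PySem.List.sorted boulders (fun x => x.1) false).foldl (rwStepB blocks)
    ([], PySem.Dict.empty)).1

-- ===== PRECONDITION & SPEC =====
-- Pre_ restricts to the natural domain: boulder columns ≥ 0 (grid coordinates). On a boulder
-- with a negative column A's loop never reaches the col == 0 wall check: it diverges unless a
-- block happens to lie west, and where it does return, sliding below column 0 is behaviour B
-- (which treats column 0 as the wall) does not reproduce.
def Pre_roll_west (blocks : List (Int × Int)) (boulders : List (Int × Int)) (rows : Int) (cols : Int) : Prop :=
  ∀ b ∈ boulders, 0 ≤ b.1

instance (blocks : List (Int × Int)) (boulders : List (Int × Int)) (rows : Int) (cols : Int) : Decidable (Pre_roll_west blocks boulders rows cols) := by unfold Pre_roll_west; infer_instance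

def pvWitness_roll_west : (List (Int × Int)) × (List (Int × Int)) × Int × Int :=
  ([(1, 0), (2, 1)], [(0, 0), (3, 0), (3, 1)], 4, 4)

def Spec_roll_west (blocks : List (Int × Int)) (boulders : List (Int × Int)) (rows : Int) (cols : Int) (out : List (Int × Int)) : Prop := out = roll_west_alt blocks boulders rows cols

instance (blocks : List (Int × Int)) (boulders : List (Int × Int)) (rows : Int) (cols : Int) (out : List (Int × Int)) : Decidable (Spec_roll_west blocks boulders rows cols out) := by unfold Spec_roll_west; infer_instance

-- ===== CLAIM =====
def Claim_equal_roll_west : Prop := ∀ (blocks : List (Int × Int)) (boulders : List (Int × Int)) (rows : Int) (cols : Int), Dom_roll_west blocks boulders rows cols → Pre_roll_west blocks boulders rows cols → Spec_roll_west blocks boulders rows cols (roll_west blocks boulders rows cols)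

-- ===== LEMMAS AND PROOFS =====

-- A's slide loop returns the unique d ∈ [0, col] with the stopping condition at d and no
-- obstacle in [d, col).
theorem rwSlide_eq (blocks nb : List (Int × Int)) (row : Int) :
    ∀ (f : Nat) (col d : Int), col.toNat < f → d ≤ col → 0 ≤ d →
    (d = 0 ∨ (d - 1, row) ∈ blocks ∨ (d - 1, row) ∈ nb) →
    (∀ x : Int, d ≤ x → x < col → (x, row) ∉ blocks ∧ (x, row) ∉ nb) →
    rwSlide blocks nb row f col = d
  | 0, col, d, hf, _, _, _, _ => absurd hf (by omega)
  | f+1, col, d, hf, hdc, hd0, hstop, hfree => by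
    rw [rwSlide]
    by_cases hc : (blocks.contains (col - 1, row) || nb.contains (col - 1, row) || col == 0) = true
    · rw [if_pos hc]
      rcases eq_or_lt_of_le hdc with h | hlt
      · exact h.symm
      · exfalso
        have h1 := hfree (col - 1) (by omega) (by omega)
        have hc2 : ((col - 1, row) ∈ blocks ∨ (col - 1, row) ∈ nb) ∨ col = 0 := by
          simpa [List.contains_iff_mem] using hc
        rcases hc2 with (h | h) | h
        · exact h1.1 h
        · exact h1.2 h
        · omega
    · rw [if_neg hc]
      have hc' : ((col - 1, row) ∉ blocks ∧ (col - 1, row) ∉ nb) ∧ ¬ col = 0 := by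
        simpa [List.contains_iff_mem, not_or] using hc
      have hdlt : d ≤ col - 1 := by
        rcases eq_or_lt_of_le hdc with h | h
        · exfalso
          rcases hstop with h0 | hm | hm
          · exact hc'.2 (by omega)
          · exact hc'.1.1 (h ▸ hm)
          · exact hc'.1.2 (h ▸ hm)
        · omega
      exact rwSlide_eq blocks nb row f (col - 1) d (by omega) hdlt hd0 hstop
        (fun x hx1 hx2 => hfree x hx1 (by omega))

-- the scan of blocks computes the greatest block column in `row` west of `col` (default -1)
theorem bwScan_aux (row col : Int) (blocks : List (Int × Int)) :
    ∀ (init : Int),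
    init ≤ blocks.foldl (fun bw p => if p.2 = row ∧ p.1 < col ∧ bw < p.1 then p.1 else bw) init ∧
    (blocks.foldl (fun bw p => if p.2 = row ∧ p.1 < col ∧ bw < p.1 then p.1 else bw) init = init ∨
      ((blocks.foldl (fun bw p => if p.2 = row ∧ p.1 < col ∧ bw < p.1 then p.1 else bw) init, row) ∈ blocks ∧
        blocks.foldl (fun bw p => if p.2 = row ∧ p.1 < col ∧ bw < p.1 then p.1 else bw) init < col)) ∧
    (∀ c : Int, (c, row) ∈ blocks → c < col →
      c ≤ blocks.foldl (fun bw p => if p.2 = row ∧ p.1 < col ∧ bw < p.1 then p.1 else bw) init) := by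
  induction blocks with
  | nil => intro init; refine ⟨le_refl _, Or.inl rfl, ?_⟩; intro c hc; simp at hc
  | cons p bs ih =>
    intro init
    simp only [List.foldl_cons]
    set init' := if p.2 = row ∧ p.1 < col ∧ init < p.1 then p.1 else init with hinit'
    obtain ⟨ih1, ih2, ih3⟩ := ih init'
    have hii : init ≤ init' := by rw [hinit']; split <;> omega
    refine ⟨le_trans hii ih1, ?_, ?_⟩
    · rcases ih2 with h | h
      · rw [h, hinit']
        split
        · rename_i hq
          refine Or.inr ⟨?_, hq.2.1⟩
          rw [List.mem_cons]; left
          obtain ⟨a, c⟩ := p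
          simp only at hq ⊢
          rw [hq.1]
        · exact Or.inl rfl
      · exact Or.inr ⟨List.mem_cons_of_mem _ h.1, h.2⟩
    · intro c hc hcl
      rcases List.mem_cons.mp hc with hh | ht
      · have hp2 : p.2 = row := by rw [← hh]
        have hp1 : p.1 = c := by rw [← hh]
        by_cases hgt : init < p.1
        · have : init' = p.1 := by rw [hinit']; rw [if_pos ⟨hp2, hp1 ▸ hcl, hgt⟩]
          omega
        · omega
      · exact ih3 c ht hcl

-- bwScan_aux specialised to bwScan's initial value -1
theorem bwScan_spec (row col : Int) (blocks : List (Int × Int)) :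
    -1 ≤ bwScan blocks row col ∧
    (bwScan blocks row col = -1 ∨ ((bwScan blocks row col, row) ∈ blocks ∧ bwScan blocks row col < col)) ∧
    (∀ c : Int, (c, row) ∈ blocks → c < col → c ≤ bwScan blocks row col) :=
  bwScan_aux row col blocks (-1)

-- main simulation invariant: A's fold state (the placed list) and B's fold state
-- (placed list + per-row last-placed dict) stay in lockstep over the sorted boulder list
theorem rw_main (blocks : List (Int × Int)) :
    ∀ (L nb : List (Int × Int)) (dct : PySem.Dict Int Int),
    L.Pairwise (fun a b => a.1 ≤ b.1) →
    (∀ q ∈ L, 0 ≤ q.1) →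
    (∀ p ∈ nb, 0 ≤ p.1) →
    (∀ p ∈ nb, ∀ q ∈ L, p.1 ≤ q.1) →
    (∀ p ∈ nb, p.1 = 0 ∨ (p.1 - 1, p.2) ∈ blocks ∨ (p.1 - 1, p.2) ∈ nb) →
    (∀ r : Int, (∀ p ∈ nb, p.2 = r → p.1 ≤ dct.getD r (-1)) ∧
        (dct.getD r (-1) = -1 ∨ (dct.getD r (-1), r) ∈ nb)) →
    L.foldl (rwStepA blocks) nb = (L.foldl (rwStepB blocks) (nb, dct)).1 := by
  intro L
  induction L with
  | nil => intro nb dct _ _ _ _ _ _; rfl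
  | cons b T ih =>
    intro nb dct hpw hLnn hnn horder hstuck hlast
    obtain ⟨hhead, hpwT⟩ := List.pairwise_cons.mp hpw
    have hcol0 : (0:Int) ≤ b.1 := hLnn b (List.mem_cons_self ..)
    obtain ⟨hbw1, hbw2, hbw3⟩ := bwScan_spec b.2 b.1 blocks
    set bw := bwScan blocks b.2 b.1 with hbwdef
    set lv := dct.getD b.2 (-1) with hlvdef
    obtain ⟨hlv1, hlv2⟩ := hlast b.2
    rw [← hlvdef] at hlv1 hlv2
    set dest := if max bw lv + 1 > b.1 then b.1 else max bw lv + 1 with hdestdef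
    have hmax := max_choice bw lv
    have hmaxl := le_max_left bw lv
    have hmaxr := le_max_right bw lv
    have hbwlt : bw < b.1 := by rcases hbw2 with h | h <;> omega
    have hlvle : lv ≤ b.1 := by
      rcases hlv2 with h | h
      · omega
      · exact horder _ h b (List.mem_cons_self ..)
    have hlvm1 : (-1 : Int) ≤ lv := by
      rcases hlv2 with h | h
      · omega
      · exact le_trans (by omega) (hnn _ h)
    have hdle : dest ≤ b.1 := by rw [hdestdef]; split <;> omega
    have hd0 : (0:Int) ≤ dest := by rw [hdestdef]; split <;> omega
    have hlvdest : lv ≤ dest := by rw [hdestdef]; split <;> omega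
    -- the stopping condition holds at dest
    have hstop : dest = 0 ∨ (dest - 1, b.2) ∈ blocks ∨ (dest - 1, b.2) ∈ nb := by
      by_cases hgt : max bw lv + 1 > b.1
      · have hdc : dest = b.1 := by rw [hdestdef, if_pos hgt]
        have hlveq : lv = b.1 := by rcases hmax with hm | hm <;> omega
        have hmem : (b.1, b.2) ∈ nb := by
          rcases hlv2 with h | h
          · omega
          · rw [hlveq] at h; exact h
        have := hstuck _ hmem
        rw [hdc]; exact this
      · have hdc : dest = max bw lv + 1 := by rw [hdestdef, if_neg hgt]
        by_cases h0 : max bw lv = -1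
        · left; omega
        · right
          rcases hmax with hm | hm
          · left
            have hbwm : bw ≠ -1 := by omega
            rcases hbw2 with h | h
            · exact absurd h hbwm
            · have : dest - 1 = bw := by omega
              rw [this]; exact h.1
          · right
            have hlvm : lv ≠ -1 := by omega
            rcases hlv2 with h | h
            · exact absurd h hlvm
            · have : dest - 1 = lv := by omega
              rw [this]; exact h
    -- no obstacle strictly between dest and the boulder's column
    have hfree : ∀ x : Int, dest ≤ x → x < b.1 → (x, b.2) ∉ blocks ∧ (x, b.2) ∉ nb := by
      intro x hx1 hx2
      by_cases hgt : max bw lv + 1 > b.1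
      · exfalso; rw [hdestdef, if_pos hgt] at hx1; omega
      · rw [hdestdef, if_neg hgt] at hx1
        constructor
        · intro hmem
          have := hbw3 x hmem hx2
          omega
        · intro hmem
          have := hlv1 _ hmem rfl
          omega
    have hAeq : rwSlide blocks nb b.2 (b.1.toNat + 1) b.1 = dest :=
      rwSlide_eq blocks nb b.2 (b.1.toNat + 1) b.1 dest (by omega) hdle hd0 hstop hfree
    have hstepA : rwStepA blocks nb b = nb ++ [(dest, b.2)] := by
      rw [rwStepA, hAeq]
    have hstepB : rwStepB blocks (nb, dct) b = (nb ++ [(dest, b.2)], dct.insert b.2 dest) := by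
      rw [rwStepB]
    simp only [List.foldl_cons, hstepA, hstepB]
    -- re-establish the invariants for the extended state and apply the IH
    apply ih (nb ++ [(dest, b.2)]) (dct.insert b.2 dest) hpwT
      (fun q hq => hLnn q (List.mem_cons_of_mem _ hq))
    · intro p hp
      rcases List.mem_append.mp hp with h | h
      · exact hnn p h
      · simp only [List.mem_singleton] at h; subst h; exact hd0
    · intro p hp q hq
      rcases List.mem_append.mp hp with h | h
      · exact horder p h q (List.mem_cons_of_mem _ hq)
      · simp only [List.mem_singleton] at h; subst h; exact le_trans hdle (hhead q hq)
    · intro p hp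
      rcases List.mem_append.mp hp with h | h
      · rcases hstuck p h with h0 | hbl | hnb
        · exact Or.inl h0
        · exact Or.inr (Or.inl hbl)
        · exact Or.inr (Or.inr (List.mem_append.mpr (Or.inl hnb)))
      · simp only [List.mem_singleton] at h
        subst h
        rcases hstop with h0 | hbl | hnb
        · exact Or.inl h0
        · exact Or.inr (Or.inl hbl)
        · exact Or.inr (Or.inr (List.mem_append.mpr (Or.inl hnb)))
    · intro r
      rw [PySem.Dict.getD_insert]
      by_cases hr : r = b.2
      · rw [if_pos hr]
        constructor
        · intro p hp hpr
          rcases List.mem_append.mp hp with h | h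
          · exact le_trans (hlv1 p h (hpr.trans hr)) hlvdest
          · simp only [List.mem_singleton] at h; subst h; exact le_refl _
        · exact Or.inr (by rw [hr]; exact List.mem_append.mpr (Or.inr (by simp)))
      · rw [if_neg hr]
        constructor
        · intro p hp hpr
          rcases List.mem_append.mp hp with h | h
          · exact (hlast r).1 p h hpr
          · simp only [List.mem_singleton] at h; subst h; exact absurd hpr.symm hr
        · rcases (hlast r).2 with h | h
          · exact Or.inl h
          · exact Or.inr (List.mem_append.mpr (Or.inl h))

-- ===== VERDICT =====
theorem roll_west_spec : Claim_equal_roll_west := by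
  unfold Claim_equal_roll_west
  intro blocks boulders rows cols _ hpre
  unfold Spec_roll_west roll_west roll_west_alt
  apply rw_main blocks (PySem.List.sorted boulders (fun x => x.1) false) [] PySem.Dict.empty
    (PySem.List.sorted_pairwise boulders (fun x => x.1))
  · intro q hq
    exact hpre q ((PySem.List.mem_sorted ..).mp hq)
  · intro p hp; simp at hp
  · intro p hp; simp at hp
  · intro p hp; simp at hp
  · intro r
    refine ⟨fun p hp => by simp at hp, Or.inl ?_⟩
    rw [PySem.Dict.getD_empty]
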